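-- pv_equiv track=rewrite | github.com/chabbimilind/nwchem | experiments/dmapp_overrides/suffixPrinter.py | GetFullContextForGivenSuffixes
-- ===== SOURCE A (Python) =====
-- def GetFullContextForGivenSuffixes(S, SkippableSuffix):
-- 	fullCtxtSet = set()
-- 	for i in S:
-- 		for j in SkippableSuffix:
-- 			if i.startswith(j):
-- 				fullCtxtSet.add(i)
-- 				break
-- 	return fullCtxtSet
-- ===== SOURCE B (Python) =====
-- def GetFullContextForGivenSuffixes(S, SkippableSuffix):
--     # B: hash the prefixes once, then walk each string's own prefixes --
--     # no inner scan over SkippableSuffix.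
--     prefixes = set(SkippableSuffix)
--     fullCtxtSet = set()
--     for i in S:
--         if any(i[:k] in prefixes for k in range(len(i) + 1)):
--             fullCtxtSet.add(i)
--     return fullCtxtSet
-- ===== Notes on version B (the rewrite author's own statement) =====
-- stated objective: faster
-- what changed: B builds a hash set of the given prefixes once and tests each string by probing its own prefixes against that set, replacing A's inner linear scan over SkippableSuffix per string.
import Mathlib
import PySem

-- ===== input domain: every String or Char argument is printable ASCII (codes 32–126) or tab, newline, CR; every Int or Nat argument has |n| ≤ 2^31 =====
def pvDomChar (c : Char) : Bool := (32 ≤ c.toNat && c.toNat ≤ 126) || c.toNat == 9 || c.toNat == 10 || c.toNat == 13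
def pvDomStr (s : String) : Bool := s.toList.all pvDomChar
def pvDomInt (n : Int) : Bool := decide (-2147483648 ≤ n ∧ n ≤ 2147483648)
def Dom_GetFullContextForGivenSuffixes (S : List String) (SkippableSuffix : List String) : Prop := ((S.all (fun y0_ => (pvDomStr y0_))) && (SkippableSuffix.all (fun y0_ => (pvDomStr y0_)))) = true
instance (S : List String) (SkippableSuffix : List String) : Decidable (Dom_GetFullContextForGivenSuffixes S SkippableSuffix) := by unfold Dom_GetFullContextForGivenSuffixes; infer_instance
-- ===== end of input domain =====

-- B replaces A's per-string scan over SkippableSuffix by one prefix hash-set probed with each string's own prefixes (faster in a timing run).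


-- ===== PORT A =====
-- inner 'for j in SkippableSuffix: if i.startswith(j): add; break'
def pvInnerA (fullCtxtSet : PySem.Set String) (i : String) : List String → PySem.Set String
  | [] => fullCtxtSet
  | j :: rest =>
      if PySem.Str.startswith i j then PySem.Set.add fullCtxtSet i
      else pvInnerA fullCtxtSet i rest

def GetFullContextForGivenSuffixes (S : List String) (SkippableSuffix : List String) : List String :=
  S.foldl (fun fullCtxtSet i => pvInnerA fullCtxtSet i SkippableSuffix) PySem.Set.empty

-- ===== PORT B =====
-- 'any(i[:k] in prefixes for k in range(len(i) + 1))'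
def pvAnyOwnPrefix (prefixes : PySem.Set String) (i : String) : Bool :=
  (PySem.List.pyRange 0 (PySem.Str.len i + 1) 1).any
    (fun k => PySem.Set.contains prefixes (PySem.Str.slice i none (some k)))

def GetFullContextForGivenSuffixes_alt (S : List String) (SkippableSuffix : List String) : List String :=
  let prefixes : PySem.Set String := PySem.Set.ofList SkippableSuffix
  S.foldl
    (fun fullCtxtSet i =>
      if pvAnyOwnPrefix prefixes i then PySem.Set.add fullCtxtSet i else fullCtxtSet)
    PySem.Set.empty

-- ===== PRECONDITION & SPEC =====
def Spec_GetFullContextForGivenSuffixes (S : List String) (SkippableSuffix : List String) (out : List String) : Prop := out = GetFullContextForGivenSuffixes_alt S SkippableSuffix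
instance (S : List String) (SkippableSuffix : List String) (out : List String) : Decidable (Spec_GetFullContextForGivenSuffixes S SkippableSuffix out) := by unfold Spec_GetFullContextForGivenSuffixes; infer_instance

-- ===== CLAIM (what is proved, stated in full; the proofs are below) =====
def Claim_equal_GetFullContextForGivenSuffixes : Prop := ∀ (S : List String) (SkippableSuffix : List String), Dom_GetFullContextForGivenSuffixes S SkippableSuffix → Spec_GetFullContextForGivenSuffixes S SkippableSuffix (GetFullContextForGivenSuffixes S SkippableSuffix)

-- ===== LEMMAS AND PROOFS =====

-- A's inner loop adds i exactly when some j in the list is a prefix of i.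
theorem pvInnerA_eq (acc : PySem.Set String) (i : String) (Sk : List String) :
    pvInnerA acc i Sk =
      if Sk.any (fun j => PySem.Str.startswith i j) then PySem.Set.add acc i else acc := by
  induction Sk with
  | nil => simp [pvInnerA]
  | cons j rest ih =>
      by_cases h : PySem.Chars.startswith i.toList j.toList = true
      · simp [pvInnerA, h]
      · simp [pvInnerA, h, ih]

-- B's own-prefix probe agrees with A's scan over the prefix list.
theorem pvAnyOwnPrefix_eq (Sk : List String) (i : String) :
    pvAnyOwnPrefix (PySem.Set.ofList Sk) i = Sk.any (fun j => PySem.Str.startswith i j) := by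
  apply Bool.eq_iff_iff.mpr
  simp only [pvAnyOwnPrefix, List.any_eq_true, PySem.List.mem_pyRange_one]
  constructor
  · rintro ⟨k, ⟨hk0, _⟩, hc⟩
    have hmem : PySem.Str.slice i none (some k) ∈ Sk := by
      rw [← PySem.Set.mem_ofList]
      exact List.contains_iff_mem.mp hc
    refine ⟨_, hmem, ?_⟩
    rw [PySem.Str.startswith_eq, PySem.Chars.startswith_iff, PySem.Str.toList_slice,
        PySem.Chars.slice_eq_listSlice, PySem.List.slice_to _ hk0]
    exact List.take_prefix _ _
  · rintro ⟨j, hj, hsw⟩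
    rw [PySem.Str.startswith_eq, PySem.Chars.startswith_iff] at hsw
    refine ⟨(j.toList.length : Int), ⟨by positivity, ?_⟩, ?_⟩
    · have := hsw.length_le
      simp only [PySem.Str.len_eq]
      omega
    · have hslice : PySem.Str.slice i none (some (j.toList.length : Int)) = j := by
        apply String.toList_inj.mp
        rw [PySem.Str.toList_slice, PySem.Chars.slice_eq_listSlice, PySem.List.slice_to_natCast]
        exact (List.prefix_iff_eq_take.mp hsw).symm
      rw [hslice]
      exact List.contains_iff_mem.mpr (PySem.Set.mem_ofList Sk j |>.mpr hj)

-- ===== VERDICT (by name: the statement is the Claim_ definition above) =====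
theorem GetFullContextForGivenSuffixes_spec : Claim_equal_GetFullContextForGivenSuffixes := by
  intro S Sk _
  unfold Spec_GetFullContextForGivenSuffixes GetFullContextForGivenSuffixes
    GetFullContextForGivenSuffixes_alt
  simp only [pvInnerA_eq, pvAnyOwnPrefix_eq]
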